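-- pv_equiv track=rewrite | github.com/PrakharKopergaonkar/python-assignments | module3/name.py | patternprint
-- ===== SOURCE A (Python) =====
-- def patternprint(name):
--     matrix = [[' ' for i in range(0,4)] for j in range(0,4)]
--     if(name=='a'):
--         for i in range(0,4):
--             for j in range(0,4):
--                 if(i==0 or i==1):
--                     matrix[i][j] = '*'
--                 elif(j==0 or j==3):
--                     matrix[i][j] = '*'
--     elif(name=='k'):
--         for i in range(0,4):
--             for j in range(0,4):
--                 if((j==0 or (j==i+i)) and i!=0):
--                     matrix[i][j] = '*'
--                 elif(j==i-1 and i>=2):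
--                     matrix[i][j] = '*'
--                 elif(i==0 and (j==0 or j==3)):
--                     matrix[i][j] = '*'
--     elif(name=='h'):
--         for i in range(0,4):
--             for j in range(0,4):
--                 if(j==0 or i==2 or j==3):
--                     matrix[i][j] = '*'
--     elif(name=='r'):
--         for i in range(0,4):
--             for j in range(0,4):
--                 if((i==0 or i==1)):
--                     matrix[i][j] = '*'
--                 elif(j==i-1 or j==0):
--                     matrix[i][j] = '*'
--     elif(name=='p'):
--         for i in range(0, 4):
--             for j in range(0,4):
--                 if(j==0):
--                     matrix[i][j] = '*'
--                 if(i==0 or i==1):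
--                     matrix[i][j] = '*'
--     return matrix
-- ===== SOURCE B (Python) =====
-- _PATTERNS = {
--     'a': ["****", "****", "*  *", "*  *"],
--     'k': ["*  *", "* * ", "**  ", "* * "],
--     'h': ["*  *", "*  *", "****", "*  *"],
--     'r': ["****", "****", "**  ", "* * "],
--     'p': ["****", "****", "*   ", "*   "],
-- }
--
-- def patternprint(name):
--     rows = _PATTERNS.get(name, ["    "] * 4)
--     return [[c for c in row] for row in rows]
-- ===== Notes on version B (the rewrite author's own statement) =====
-- stated objective: simpler
-- what changed: Replaces the per-letter nested loops over arithmetic branch conditions with a literal dict of 4x4 pattern rows looked up once and split into characters.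
import Mathlib
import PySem

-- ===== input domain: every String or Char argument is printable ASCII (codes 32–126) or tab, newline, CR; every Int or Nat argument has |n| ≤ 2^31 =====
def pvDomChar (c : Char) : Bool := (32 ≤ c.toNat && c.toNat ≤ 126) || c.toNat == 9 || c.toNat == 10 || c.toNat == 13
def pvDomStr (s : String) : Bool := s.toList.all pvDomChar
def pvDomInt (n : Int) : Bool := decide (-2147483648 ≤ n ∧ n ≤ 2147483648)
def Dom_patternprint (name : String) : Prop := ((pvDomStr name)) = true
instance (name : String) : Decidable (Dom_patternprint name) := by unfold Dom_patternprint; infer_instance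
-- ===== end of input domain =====

-- B replaces per-letter nested loops of arithmetic branch tests with a dict of 4x4 pattern rows
-- looked up once and transcribed cell by cell (objective: simpler).

-- ===== PORT A =====
-- matrix[i][j] = v; here i, j always come from range(0,4), so they are in range (exact there)
def pvSetCell (m : List (List String)) (i j : Int) (v : String) : List (List String) :=
  m.set i.toNat ((m.getD i.toNat []).set j.toNat v)

def patternprint (name : String) : List (List String) :=
  let matrix := (PySem.List.pyRange 0 4 1).map (fun _ => (PySem.List.pyRange 0 4 1).map (fun _ => " "))
  if name = "a" then
    (PySem.List.pyRange 0 4 1).foldl (fun m i =>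
      (PySem.List.pyRange 0 4 1).foldl (fun m j =>
        if i = 0 ∨ i = 1 then pvSetCell m i j "*"
        else if j = 0 ∨ j = 3 then pvSetCell m i j "*"
        else m) m) matrix
  else if name = "k" then
    (PySem.List.pyRange 0 4 1).foldl (fun m i =>
      (PySem.List.pyRange 0 4 1).foldl (fun m j =>
        if (j = 0 ∨ j = i + i) ∧ i ≠ 0 then pvSetCell m i j "*"
        else if j = i - 1 ∧ i ≥ 2 then pvSetCell m i j "*"
        else if i = 0 ∧ (j = 0 ∨ j = 3) then pvSetCell m i j "*"
        else m) m) matrix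
  else if name = "h" then
    (PySem.List.pyRange 0 4 1).foldl (fun m i =>
      (PySem.List.pyRange 0 4 1).foldl (fun m j =>
        if j = 0 ∨ i = 2 ∨ j = 3 then pvSetCell m i j "*"
        else m) m) matrix
  else if name = "r" then
    (PySem.List.pyRange 0 4 1).foldl (fun m i =>
      (PySem.List.pyRange 0 4 1).foldl (fun m j =>
        if i = 0 ∨ i = 1 then pvSetCell m i j "*"
        else if j = i - 1 ∨ j = 0 then pvSetCell m i j "*"
        else m) m) matrix
  else if name = "p" then
    (PySem.List.pyRange 0 4 1).foldl (fun m i =>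
      (PySem.List.pyRange 0 4 1).foldl (fun m j =>
        let m := if j = 0 then pvSetCell m i j "*" else m
        if i = 0 ∨ i = 1 then pvSetCell m i j "*" else m) m) matrix
  else matrix

-- ===== PORT B =====
def pvPatterns : PySem.Dict String (List String) :=
  PySem.Dict.ofList
    [("a", ["****", "****", "*  *", "*  *"]),
     ("k", ["*  *", "* * ", "**  ", "* * "]),
     ("h", ["*  *", "*  *", "****", "*  *"]),
     ("r", ["****", "****", "**  ", "* * "]),
     ("p", ["****", "****", "*   ", "*   "])]

def patternprint_alt (name : String) : List (List String) :=
  let rows := PySem.Dict.getD pvPatterns name (List.replicate 4 "    ")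
  rows.map (fun row => row.toList.map (fun c => String.ofList [c]))

-- ===== PRECONDITION & SPEC =====
def Spec_patternprint (name : String) (out : List (List String)) : Prop := out = patternprint_alt name
instance (name : String) (out : List (List String)) : Decidable (Spec_patternprint name out) := by unfold Spec_patternprint; infer_instance

-- ===== CLAIM (what is proved, stated in full; the proofs are below) =====
def Claim_equal_patternprint : Prop := ∀ (name : String), Dom_patternprint name → Spec_patternprint name (patternprint name)

-- ===== LEMMAS AND PROOFS =====
theorem patternprint_eq (name : String) : patternprint name = patternprint_alt name := by
  by_cases h1 : name = "a"
  · subst h1; decide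
  by_cases h2 : name = "k"
  · subst h2; decide
  by_cases h3 : name = "h"
  · subst h3; decide
  by_cases h4 : name = "r"
  · subst h4; decide
  by_cases h5 : name = "p"
  · subst h5; decide
  simp [patternprint, patternprint_alt, pvPatterns, PySem.Dict.ofList, PySem.Dict.update, List.foldl,
        PySem.Dict.getD_insert, PySem.Dict.getD_empty, h1, h2, h3, h4, h5]

-- ===== VERDICT (by name: the statement is the Claim_ definition above) =====
theorem patternprint_spec : Claim_equal_patternprint := by
  intro name _
  exact patternprint_eq name
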